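-- pv_equiv track=rewrite | github.com/Ayesha040/Small-Projects | Anagrams.py | anagram_families
-- ===== SOURCE A (Python) =====
-- def are_anagrams(str1, str2):
--     return sorted(str1) == sorted(str2)
--
-- def anagram_families(lst):
--     # create an empty dictionary to store the anagram families
--     families = {}
--     # iterate over each word in the input list
--     for word in lst:
--         added = False
--         # iterate over the keys in the families dictionary
--         for key in families:
--             # check if the current word is an anagram of the current key
--             if are_anagrams(word, key):
--                 # add the word to the list of anagrams for the current key
--                 families[key].append(word)
--                 added = True
--         # if the word did not fit into any existing anagram family, create a new one
--         if not added:
--             families[word] = [word]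
--     # return the number of anagram families
--     return len(families)
-- ===== SOURCE B (Python) =====
-- def anagram_families(lst):
--     return len({tuple(sorted(word)) for word in lst})
-- ===== Notes on version B (the rewrite author's own statement) =====
-- stated objective: faster
-- what changed: Replaced the quadratic scan comparing each word against every existing family key by a set of sorted-character signatures (one signature per word, distinct signatures counted), removing the inner loop entirely.
import Mathlib
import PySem

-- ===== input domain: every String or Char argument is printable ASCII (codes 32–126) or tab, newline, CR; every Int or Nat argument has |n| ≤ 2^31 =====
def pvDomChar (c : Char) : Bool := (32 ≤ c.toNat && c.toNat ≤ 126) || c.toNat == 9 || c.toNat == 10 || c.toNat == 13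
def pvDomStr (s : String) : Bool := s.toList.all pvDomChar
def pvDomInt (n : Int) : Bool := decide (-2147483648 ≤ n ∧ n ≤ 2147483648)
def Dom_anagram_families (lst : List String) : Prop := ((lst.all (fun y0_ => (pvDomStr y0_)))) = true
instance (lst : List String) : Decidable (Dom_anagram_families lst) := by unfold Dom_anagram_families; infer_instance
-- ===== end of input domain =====

-- B replaces A's quadratic key-by-key anagram scan with a set of sorted-character
-- signatures, counting distinct signatures in one pass (asymptotically faster).


-- ===== PORT A =====
-- sorted(str1) == sorted(str2)
def are_anagrams (str1 str2 : String) : Bool :=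
  PySem.List.sorted str1.toList (fun c => c) false == PySem.List.sorted str2.toList (fun c => c) false

-- one iteration of A's outer loop: scan all current keys, append to every
-- anagram family found; if none matched, open a new family keyed by the word
def anagram_families_step (fam : PySem.Dict String (List String)) (word : String) :
    PySem.Dict String (List String) :=
  let st := fam.keys.foldl
    (fun (st : PySem.Dict String (List String) × Bool) key =>
      if are_anagrams word key then (st.1.modify key [] (· ++ [word]), true) else st)
    (fam, false)
  if st.2 then st.1 else st.1.insert word [word]

def anagram_families (lst : List String) : Int :=
  let families := lst.foldl anagram_families_step PySem.Dict.empty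
  (families.size : Int)

-- ===== PORT B =====
def anagram_families_alt (lst : List String) : Int :=
  ((PySem.Set.ofList (lst.map (fun word => PySem.List.sorted word.toList (fun c => c) false))).length : Int)

-- ===== PRECONDITION & SPEC =====
def Spec_anagram_families (lst : List String) (out : Int) : Prop := out = anagram_families_alt lst
instance (lst : List String) (out : Int) : Decidable (Spec_anagram_families lst out) := by unfold Spec_anagram_families; infer_instance

-- ===== CLAIM (what is proved, stated in full; the proofs are below) =====
def Claim_equal_anagram_families : Prop := ∀ (lst : List String), Dom_anagram_families lst → Spec_anagram_families lst (anagram_families lst)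

-- ===== LEMMAS AND PROOFS =====

-- the word's anagram signature
def pvSig (s : String) : List Char := PySem.List.sorted s.toList (fun c => c) false

-- A's inner loop: the Bool accumulator becomes `any`
lemma pvFoldl_or_any (cond : String → Bool) :
    ∀ (l : List String) (b : Bool),
      l.foldl (fun b k => if cond k then true else b) b = (b || l.any cond) := by
  intro l; induction l with
  | nil => intro b; simp
  | cons k t ih =>
      intro b
      rw [List.foldl_cons, ih]
      cases h : cond k <;> simp [h]

-- A's inner loop: conditional `modify` of existing keys never changes the key list
lemma pvFoldl_modify_keys (cond : String → Bool) (word : String) :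
    ∀ (l : List String) (d : PySem.Dict String (List String)),
      (∀ k ∈ l, k ∈ d.keys) →
      (l.foldl (fun d k => if cond k then d.modify k [] (· ++ [word]) else d) d).keys = d.keys := by
  intro l; induction l with
  | nil => intro d _; rfl
  | cons k t ih =>
      intro d hmem
      rw [List.foldl_cons]
      by_cases h : cond k = true
      · have hk : (d.modify k [] (· ++ [word])).keys = d.keys := by
          rw [PySem.Dict.keys_modify,
              PySem.Dict.keys_insert_of_contains d _
                ((PySem.Dict.contains_iff_mem_keys d k).mpr (hmem k (List.mem_cons_self)))]
        rw [if_pos h, ih _ (fun x hx => hk ▸ hmem x (List.mem_cons_of_mem _ hx)), hk]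
      · rw [if_neg h]
        exact ih _ (fun x hx => hmem x (List.mem_cons_of_mem _ hx))

-- split the (dict, flag) accumulator of the inner loop into two independent folds
lemma pvInner_split (word : String) :
    ∀ (l : List String) (d : PySem.Dict String (List String)) (b : Bool),
    l.foldl
      (fun (st : PySem.Dict String (List String) × Bool) key =>
        if are_anagrams word key then (st.1.modify key [] (· ++ [word]), true) else st)
      (d, b)
    = (l.foldl (fun d k => if are_anagrams word k then d.modify k [] (· ++ [word]) else d) d,
       l.foldl (fun b k => if are_anagrams word k then true else b) b) := by
  intro l; induction l with
  | nil => intro d b; rfl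
  | cons k t ih =>
      intro d b
      simp only [List.foldl_cons]
      by_cases h : are_anagrams word k = true
      · rw [if_pos h, if_pos h, if_pos h]; exact ih _ _
      · rw [if_neg h, if_neg h, if_neg h]; exact ih _ _

-- one outer step, seen through the signature map of the keys
lemma pvStep_keys_sig (fam : PySem.Dict String (List String)) (word : String) :
    (anagram_families_step fam word).keys.map pvSig
      = PySem.Set.add (fam.keys.map pvSig) (pvSig word) := by
  unfold anagram_families_step
  rw [pvInner_split]
  simp only [pvFoldl_or_any, Bool.false_or]
  have hkeys : (fam.keys.foldl
      (fun d k => if are_anagrams word k then d.modify k [] (· ++ [word]) else d) fam).keys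
      = fam.keys := pvFoldl_modify_keys _ word fam.keys fam (fun _ hk => hk)
  by_cases h : fam.keys.any (fun k => are_anagrams word k) = true
  · rw [if_pos h, hkeys]
    have hmem : pvSig word ∈ fam.keys.map pvSig := by
      rcases List.any_eq_true.mp h with ⟨k, hk, hak⟩
      have : pvSig word = pvSig k := by
        simpa [are_anagrams, pvSig] using hak
      exact this ▸ List.mem_map_of_mem hk
    rw [PySem.Set.add_of_mem hmem]
  · rw [if_neg h]
    have hnot : pvSig word ∉ fam.keys.map pvSig := by
      intro hmem
      rcases List.mem_map.mp hmem with ⟨k, hk, hsk⟩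
      have hak : are_anagrams word k = true := by
        simp only [are_anagrams, pvSig] at hsk ⊢
        simp [hsk]
      exact absurd (List.any_eq_true.mpr ⟨k, hk, hak⟩) (by simp_all)
    have hwk : word ∉ fam.keys := fun hw => hnot (List.mem_map_of_mem hw)
    have hc : (fam.keys.foldl
        (fun d k => if are_anagrams word k then d.modify k [] (· ++ [word]) else d) fam).contains word = false := by
      rw [← Bool.not_eq_true, PySem.Dict.contains_iff_mem_keys, hkeys]
      exact hwk
    rw [PySem.Dict.keys_insert_of_not_contains _ _ hc, hkeys, List.map_append,
        PySem.Set.add_of_not_mem hnot]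
    rfl

-- loop invariant: the keys' signatures ARE B's running set
lemma pvInvariant :
    ∀ (lst : List String) (d : PySem.Dict String (List String)),
      (lst.foldl anagram_families_step d).keys.map pvSig
        = lst.foldl (fun s w => PySem.Set.add s (pvSig w)) (d.keys.map pvSig) := by
  intro lst; induction lst with
  | nil => intro d; rfl
  | cons w t ih =>
      intro d
      simp only [List.foldl_cons]
      rw [ih, pvStep_keys_sig]

theorem pvMain (lst : List String) :
    anagram_families lst = anagram_families_alt lst := by
  unfold anagram_families anagram_families_alt
  have h := pvInvariant lst PySem.Dict.empty
  have hk : (PySem.Dict.empty : PySem.Dict String (List String)).keys.map pvSig = ([] : PySem.Set (List Char)) := rfl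
  rw [hk] at h
  have hset : PySem.Set.ofList (lst.map pvSig)
      = lst.foldl (fun s w => PySem.Set.add s (pvSig w)) ([] : PySem.Set (List Char)) := by
    rw [PySem.Set.ofList_eq_foldl, List.foldl_map]
  have hlen : (lst.foldl anagram_families_step PySem.Dict.empty).size
      = (PySem.Set.ofList (lst.map pvSig)).length := by
    have h1 : ((lst.foldl anagram_families_step PySem.Dict.empty).keys.map pvSig).length
        = (PySem.Set.ofList (lst.map pvSig)).length := by rw [h, hset]
    simpa [PySem.Dict.keys, PySem.Dict.size, List.length_map] using h1
  exact_mod_cast congrArg Int.ofNat hlen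

-- ===== VERDICT (by name: the statement is the Claim_ definition above) =====
theorem anagram_families_spec : Claim_equal_anagram_families := by
  intro lst _
  unfold Spec_anagram_families
  exact pvMain lst
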